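-- pv_equiv track=rewrite | github.com/thakur-patel/optics-framework | optics_framework/helper/execute.py | _identify_yaml_content
-- ===== SOURCE A (Python) =====
-- from typing import Optional, Tuple, List, Dict, Set, Any
--
-- def _identify_yaml_content(data: Dict) -> Set[str]:
--     """
--     Identify content types based on YAML keys.
--
--     :param data: Dictionary loaded from YAML file.
--     :return: Set of content types ('test_cases', 'modules', 'elements', 'api').
--     """
--     content_types = set()
--     keys = _normalize_yaml_keys(data)
--
--     if any(k in keys for k in ("test cases", "test_cases", "test-cases", "testcases")):
--         content_types.add("test_cases")
--     if "modules" in keys: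
--         content_types.add("modules")
--     if "elements" in keys:
--         content_types.add("elements")
--     if any(k in keys for k in ("api", "apis")):
--         content_types.add("api")
--
--     return content_types
--
-- def _normalize_yaml_keys(data: Dict) -> Set[str]:
--     """
--     Return a set of normalized (lowercased and stripped) keys from a YAML mapping.
--
--     This centralizes the normalization logic so other functions can reuse it and
--     improves readability.
--     """
--     if not isinstance(data, dict):
--         return set()
--     return {str(k).strip().lower() for k in data.keys()}
-- ===== SOURCE B (Python) =====
-- _ALIAS_TO_LABEL = {
--     "test cases": "test_cases",
--     "test_cases": "test_cases",
--     "test-cases": "test_cases",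
--     "testcases": "test_cases",
--     "modules": "modules",
--     "elements": "elements",
--     "api": "api",
--     "apis": "api",
-- }
--
-- _LABELS = ("test_cases", "modules", "elements", "api")
--
--
-- def _identify_yaml_content(data):
--     """Single pass over the input keys through a constant alias->label dict,
--     instead of scanning alias groups against a normalized key set."""
--     if not isinstance(data, dict):
--         return set()
--     found = {_ALIAS_TO_LABEL.get(str(k).strip().lower()) for k in data}
--     return {label for label in _LABELS if label in found}
-- ===== Notes on version B (the rewrite author's own statement) =====
-- stated objective: idiomatic
-- what changed: Inverts the traversal: instead of building a normalized key set and scanning four alias groups for membership in it, B maps each input key once through a constant alias-to-label dict and then keeps the labels that were hit, so the per-group membership scans disappear.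
import Mathlib
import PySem

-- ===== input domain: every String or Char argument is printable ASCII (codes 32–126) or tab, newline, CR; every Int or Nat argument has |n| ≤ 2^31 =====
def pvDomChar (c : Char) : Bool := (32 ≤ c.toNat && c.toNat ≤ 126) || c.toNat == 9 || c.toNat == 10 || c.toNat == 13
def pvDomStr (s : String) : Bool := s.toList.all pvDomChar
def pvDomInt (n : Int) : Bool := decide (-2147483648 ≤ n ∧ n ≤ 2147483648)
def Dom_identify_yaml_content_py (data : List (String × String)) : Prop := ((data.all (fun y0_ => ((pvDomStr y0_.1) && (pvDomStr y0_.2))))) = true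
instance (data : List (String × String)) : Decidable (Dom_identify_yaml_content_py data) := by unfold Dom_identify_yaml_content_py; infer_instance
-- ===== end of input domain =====

-- B inverts the traversal: one pass mapping each input key through a constant alias->label dict,
-- then keeping the labels that were hit (objective: idiomatic; no speed claim).

-- ===== PORT A =====
-- str(k).strip().lower()
def pvNorm (k : String) : String := PySem.Str.lower (PySem.Str.strip k)

-- _normalize_yaml_keys: {str(k).strip().lower() for k in data.keys()} (the isinstance-dict guard is
-- always true here: under the type convention `data` is a dict)
def pvNormKeys (data : List (String × String)) : PySem.Set String :=
  PySem.Set.ofList (((PySem.Dict.ofList data).keys).map pvNorm)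

def identify_yaml_content_py (data : List (String × String)) : List String :=
  let keys := pvNormKeys data
  let ct0 : PySem.Set String := PySem.Set.empty
  let ct1 := if (["test cases", "test_cases", "test-cases", "testcases"].any
                  (fun k => PySem.Set.contains keys k)) then PySem.Set.add ct0 "test_cases" else ct0
  let ct2 := if PySem.Set.contains keys "modules" then PySem.Set.add ct1 "modules" else ct1
  let ct3 := if PySem.Set.contains keys "elements" then PySem.Set.add ct2 "elements" else ct2
  let ct4 := if (["api", "apis"].any (fun k => PySem.Set.contains keys k)) then PySem.Set.add ct3 "api" else ct3
  ct4

-- ===== PORT B =====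
def pvAliasToLabel : PySem.Dict String String :=
  PySem.Dict.ofList
    [ ("test cases", "test_cases"), ("test_cases", "test_cases")
    , ("test-cases", "test_cases"), ("testcases", "test_cases")
    , ("modules", "modules"), ("elements", "elements")
    , ("api", "api"), ("apis", "api") ]

def pvLabels : List String := ["test_cases", "modules", "elements", "api"]

def identify_yaml_content_py_alt (data : List (String × String)) : List String :=
  -- {_ALIAS_TO_LABEL.get(str(k).strip().lower()) for k in data}
  let found : PySem.Set (Option String) :=
    PySem.Set.ofList (((PySem.Dict.ofList data).keys).map (fun k => pvAliasToLabel.get? (pvNorm k)))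
  -- {label for label in _LABELS if label in found}
  PySem.Set.ofList (pvLabels.filter (fun label => PySem.Set.contains found (some label)))

-- ===== PRECONDITION & SPEC =====
def Spec_identify_yaml_content_py (data : List (String × String)) (out : List String) : Prop := out = identify_yaml_content_py_alt data
instance (data : List (String × String)) (out : List String) : Decidable (Spec_identify_yaml_content_py data out) := by unfold Spec_identify_yaml_content_py; infer_instance

-- ===== CLAIM (what is proved, stated in full; the proofs are below) =====
def Claim_equal_identify_yaml_content_py : Prop := ∀ (data : List (String × String)), Dom_identify_yaml_content_py data → Spec_identify_yaml_content_py data (identify_yaml_content_py data)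

-- ===== LEMMAS AND PROOFS =====

-- the literal alias dict, as an association list
theorem aliasToLabel_mk : pvAliasToLabel = PySem.Dict.mk
    [ ("test cases", "test_cases"), ("test_cases", "test_cases")
    , ("test-cases", "test_cases"), ("testcases", "test_cases")
    , ("modules", "modules"), ("elements", "elements")
    , ("api", "api"), ("apis", "api") ] := by decide

-- B's dict lookup hits label L exactly on L's alias strings (one lemma per label)
theorem getq_tc (s : String) : (pvAliasToLabel.get? s = some "test_cases") ↔
    (s ∈ (["test cases", "test_cases", "test-cases", "testcases"] : List String)) := by
  rw [aliasToLabel_mk]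
  simp only [PySem.Dict.get?_mk_cons, beq_iff_eq]
  split_ifs <;>
    first
    | (subst_vars; decide)
    | (simp only [PySem.Dict.get?, List.mem_cons, List.not_mem_nil, or_false]
       constructor
       · intro hc; exact absurd hc (by simp)
       · rintro (rfl | rfl | rfl | rfl) <;> simp_all)

theorem getq_mod (s : String) : (pvAliasToLabel.get? s = some "modules") ↔
    (s ∈ (["modules"] : List String)) := by
  rw [aliasToLabel_mk]
  simp only [PySem.Dict.get?_mk_cons, beq_iff_eq]
  split_ifs <;>
    first
    | (subst_vars; decide)
    | (simp only [PySem.Dict.get?, List.mem_cons, List.not_mem_nil, or_false]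
       constructor
       · intro hc; exact absurd hc (by simp)
       · (rintro rfl; simp_all))

theorem getq_el (s : String) : (pvAliasToLabel.get? s = some "elements") ↔
    (s ∈ (["elements"] : List String)) := by
  rw [aliasToLabel_mk]
  simp only [PySem.Dict.get?_mk_cons, beq_iff_eq]
  split_ifs <;>
    first
    | (subst_vars; decide)
    | (simp only [PySem.Dict.get?, List.mem_cons, List.not_mem_nil, or_false]
       constructor
       · intro hc; exact absurd hc (by simp)
       · (rintro rfl; simp_all))

theorem getq_api (s : String) : (pvAliasToLabel.get? s = some "api") ↔
    (s ∈ (["api", "apis"] : List String)) := by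
  rw [aliasToLabel_mk]
  simp only [PySem.Dict.get?_mk_cons, beq_iff_eq]
  split_ifs <;>
    first
    | (subst_vars; decide)
    | (simp only [PySem.Dict.get?, List.mem_cons, List.not_mem_nil, or_false]
       constructor
       · intro hc; exact absurd hc (by simp)
       · rintro (rfl | rfl) <;> simp_all)

-- 'some L is among the looked-up keys' is A's 'some alias of L is among the normalized keys'
theorem cond_eq (ks : List String) (L : String) (as : List String)
    (h : ∀ s : String, (pvAliasToLabel.get? s = some L) ↔ s ∈ as) :
    PySem.Set.contains
        (PySem.Set.ofList (ks.map (fun k => pvAliasToLabel.get? (pvNorm k)))) (some L)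
      = as.any (fun a => PySem.Set.contains (PySem.Set.ofList (ks.map pvNorm)) a) := by
  rw [Bool.eq_iff_iff]
  simp only [PySem.Set.contains_iff, PySem.Set.mem_ofList, List.any_eq_true, List.mem_map]
  constructor
  · rintro ⟨k, hk, hget⟩
    exact ⟨pvNorm k, (h _).mp hget, k, hk, rfl⟩
  · rintro ⟨a, ha, k, hk, rfl⟩
    exact ⟨k, hk, (h _).mpr ha⟩

-- ===== VERDICT (by name: the statement is the Claim_ definition above) =====
theorem identify_yaml_content_py_spec : Claim_equal_identify_yaml_content_py := by
  intro data _
  unfold Spec_identify_yaml_content_py identify_yaml_content_py identify_yaml_content_py_alt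
  simp only [pvLabels, pvNormKeys, List.filter_cons, List.filter_nil,
    cond_eq _ _ _ getq_tc, cond_eq _ _ _ getq_mod, cond_eq _ _ _ getq_el, cond_eq _ _ _ getq_api,
    List.any_cons, List.any_nil, Bool.or_false]
  split_ifs <;> rfl
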